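-- pv_equiv track=rewrite | github.com/grapheneaffiliate/h4-polytopic-attention | solve_arc1_recovery.py | solve_ded97339
-- ===== SOURCE A (Python) =====
-- def solve_ded97339(grid):
--     """Connect pairs of 8s: pairs on same row → horizontal line, pairs on same col → vertical line.
--     For unpaired 8s with shared column to another pair's endpoint, connect vertically."""
--     rows, cols = len(grid), len(grid[0])
--     out = [row[:] for row in grid]
--     eights = [(r, c) for r in range(rows) for c in range(cols) if grid[r][c] == 8]
--
--     from collections import defaultdict
--     by_row = defaultdict(list)
--     by_col = defaultdict(list)
--     for r, c in eights:
--         by_row[r].append(c)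
--         by_col[c].append(r)
--
--     # Connect pairs on same row
--     for r, cs in by_row.items():
--         if len(cs) == 2:
--             c1, c2 = sorted(cs)
--             for c in range(c1, c2+1):
--                 out[r][c] = 8
--
--     # Connect pairs on same col
--     for c, rs in by_col.items():
--         if len(rs) == 2:
--             r1, r2 = sorted(rs)
--             for r in range(r1, r2+1):
--                 out[r][c] = 8
--
--     return out
-- ===== SOURCE B (Python) =====
-- def solve_ded97339(grid):
--     """Connect pairs of 8s: a row or column containing exactly two 8s gets the
--     cells between them filled with 8. Pure construction: precompute the pair of
--     positions per row/column, then build each output row directly."""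
--     rows, cols = len(grid), len(grid[0])
--
--     def pair(ps):
--         return ps if len(ps) == 2 else None
--
--     col_pairs = [pair([r for r in range(rows) if grid[r][c] == 8]) for c in range(cols)]
--
--     result = []
--     for r, row in enumerate(grid):
--         row_pair = pair([c for c in range(cols) if row[c] == 8])
--         new = list(row)
--         for c in range(cols):
--             cp = col_pairs[c]
--             if (row_pair and row_pair[0] <= c <= row_pair[1]) or (cp and cp[0] <= r <= cp[1]):
--                 new[c] = 8
--         result.append(new)
--     return result
-- ===== Notes on version B (the rewrite author's own statement) =====
-- stated objective: simpler
-- what changed: Replaces A's global eights list, the two defaultdict groupings and the two in-place mutation passes over a copied grid by a pure construction: the pair of 8-positions per column and per row is precomputed by direct scans, and each output row is built in one pass (copy the row, set to 8 the cells lying on a row or column segment); Pre_ excludes only the inputs on which A raises IndexError (the empty grid and grids with a row shorter than the first).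
import Mathlib
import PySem

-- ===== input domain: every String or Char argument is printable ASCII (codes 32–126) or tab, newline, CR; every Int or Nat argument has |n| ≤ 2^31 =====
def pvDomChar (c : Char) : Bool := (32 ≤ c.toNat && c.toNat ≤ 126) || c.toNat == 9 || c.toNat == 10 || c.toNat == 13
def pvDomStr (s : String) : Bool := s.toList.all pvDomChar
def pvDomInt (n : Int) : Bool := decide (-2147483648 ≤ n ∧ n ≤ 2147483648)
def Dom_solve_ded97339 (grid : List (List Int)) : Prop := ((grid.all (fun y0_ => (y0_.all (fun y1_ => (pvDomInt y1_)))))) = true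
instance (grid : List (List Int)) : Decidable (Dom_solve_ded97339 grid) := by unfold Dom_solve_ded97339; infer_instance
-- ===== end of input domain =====

-- B replaces A's eights list, defaultdict groupings and two mutation passes by a pure
-- pointwise construction from precomputed row/column spans (objective: simpler).

-- ===== PORT A =====
-- out[r][c] = v  (r, c are in range on every use admitted by Pre_)
def pvSet2 (out : List (List Int)) (r c : Int) (v : Int) : List (List Int) :=
  PySem.List.pySetD out r (PySem.List.pySetD (PySem.List.pyGetD out r []) c v)

def solve_ded97339 (grid : List (List Int)) : List (List Int) :=
  let rows := grid.length
  let cols := (grid.headD []).length   -- len(grid[0]); the IndexError on [] is excluded by Pre_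
  let out := grid.map (fun row => PySem.List.slice row none none)   -- [row[:] for row in grid]
  let eights : List (Int × Int) :=
    (List.range rows).flatMap (fun r =>
      (List.range cols).filterMap (fun c =>
        if (grid.getD r []).getD c 0 = 8 then some ((r : Int), (c : Int)) else none))
  -- by_row / by_col: one loop appending to two defaultdict(list)s
  let dd := eights.foldl
      (fun (dd : PySem.Dict Int (List Int) × PySem.Dict Int (List Int)) p =>
        (dd.1.modify p.1 [] (· ++ [p.2]), dd.2.modify p.2 [] (· ++ [p.1])))
      (PySem.Dict.empty, PySem.Dict.empty)
  -- connect pairs on same row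
  let out1 := dd.1.items.foldl
      (fun out p =>
        if p.2.length = 2 then
          let s := PySem.List.sorted p.2 (fun x => x) false
          (PySem.List.pyRange (s.getD 0 0) (s.getD 1 0 + 1) 1).foldl
            (fun out c => pvSet2 out p.1 c 8) out
        else out) out
  -- connect pairs on same col
  let out2 := dd.2.items.foldl
      (fun out p =>
        if p.2.length = 2 then
          let s := PySem.List.sorted p.2 (fun x => x) false
          (PySem.List.pyRange (s.getD 0 0) (s.getD 1 0 + 1) 1).foldl
            (fun out r => pvSet2 out r p.1 8) out
        else out) out1
  out2

-- ===== PORT B =====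
def pvPair (ps : List Int) : Option (List Int) :=
  if ps.length = 2 then some ps else none

def solve_ded97339_alt (grid : List (List Int)) : List (List Int) :=
  let rows := grid.length
  let cols := (grid.headD []).length
  let colPairs := (List.range cols).map (fun c =>
    pvPair ((List.range rows).filterMap (fun r =>
      if (grid.getD r []).getD c 0 = 8 then some ((r : Int)) else none)))
  (PySem.List.enumerate grid 0).map (fun (p : Int × List Int) =>
    let rowPair := pvPair ((List.range cols).filterMap (fun (c : Nat) =>
      if p.2.getD c 0 = 8 then some ((c : Int)) else none))
    (List.range cols).foldl (fun new (c : Nat) =>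
      if ((match rowPair with
           | some ps => decide (ps.getD 0 0 ≤ (c : Int) ∧ (c : Int) ≤ ps.getD 1 0)
           | none => false) ||
          (match colPairs.getD c none with
           | some ps => decide (ps.getD 0 0 ≤ p.1 ∧ p.1 ≤ ps.getD 1 0)
           | none => false)) then PySem.List.pySetD new ((c : Nat) : Int) 8 else new) p.2)

-- ===== PRECONDITION & SPEC =====
-- Exactly the inputs on which A returns: A raises IndexError on the empty grid (len(grid[0]))
-- and on grids having a row shorter than the first row (grid[r][c] for c < cols).
def Pre_solve_ded97339 (grid : List (List Int)) : Prop :=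
  grid ≠ [] ∧ ∀ row ∈ grid, (grid.headD []).length ≤ row.length
instance (grid : List (List Int)) : Decidable (Pre_solve_ded97339 grid) := by
  unfold Pre_solve_ded97339; infer_instance

def pvWitness_solve_ded97339 : List (List Int) := [[8, 0, 8], [0, 0, 0]]

def Spec_solve_ded97339 (grid : List (List Int)) (out : List (List Int)) : Prop := out = solve_ded97339_alt grid
instance (grid : List (List Int)) (out : List (List Int)) : Decidable (Spec_solve_ded97339 grid out) := by unfold Spec_solve_ded97339; infer_instance

-- ===== CLAIM (what is proved, stated in full; the proofs are below) =====
def Claim_equal_solve_ded97339 : Prop := ∀ (grid : List (List Int)), Dom_solve_ded97339 grid → Pre_solve_ded97339 grid → Spec_solve_ded97339 grid (solve_ded97339 grid)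

-- ===== LEMMAS AND PROOFS =====

-- ---- abbreviations used only by the proofs ----

-- positions (as Ints) of value 8 among the first m entries of a row
def rowPosL (m : Nat) (row : List Int) : List Int :=
  (List.range m).filterMap (fun c => if row.getD c 0 = 8 then some ((c : Int)) else none)

def colPosL (grid : List (List Int)) (c : Nat) : List Int :=
  (List.range grid.length).filterMap
    (fun r => if (grid.getD r []).getD c 0 = 8 then some ((r : Int)) else none)

-- the effect of one by_row item on its own row
def rowStep (row : List Int) (cs : List Int) : List Int :=
  if cs.length = 2 then
    (PySem.List.pyRange ((PySem.List.sorted cs (fun x => x) false).getD 0 0)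
      ((PySem.List.sorted cs (fun x => x) false).getD 1 0 + 1) 1).foldl
      (fun r c => PySem.List.pySetD r c 8) row
  else row

-- ---- basic list lemmas ----

theorem mem_rowPosL {m : Nat} {row : List Int} {x : Int} :
    x ∈ rowPosL m row ↔ ∃ c : Nat, c < m ∧ x = (c : Int) ∧ row.getD c 0 = 8 := by
  simp only [rowPosL, List.mem_filterMap, List.mem_range]
  constructor
  · rintro ⟨c, hc, h⟩
    by_cases h8 : row.getD c 0 = 8
    · rw [if_pos h8] at h
      exact ⟨c, hc, (Option.some_inj.1 h).symm, h8⟩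
    · rw [if_neg h8] at h
      exact absurd h (by simp)
  · rintro ⟨c, hc, rfl, h8⟩
    exact ⟨c, hc, by rw [if_pos h8]⟩

theorem rowPosL_nonneg {m : Nat} {row : List Int} {x : Int} (h : x ∈ rowPosL m row) : 0 ≤ x := by
  rcases mem_rowPosL.1 h with ⟨c, _, rfl, _⟩; exact Int.natCast_nonneg c

theorem rowPosL_pairwise (m : Nat) (row : List Int) : (rowPosL m row).Pairwise (· < ·) := by
  unfold rowPosL
  rw [List.pairwise_filterMap]
  refine List.pairwise_lt_range.imp ?_
  intro a b hab x hx y hy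
  have hxa : x = (a : Int) := by
    by_cases ha : row.getD a 0 = 8
    · rw [if_pos ha] at hx; exact (Option.some_inj.1 hx).symm
    · rw [if_neg ha] at hx; exact absurd hx (by simp)
  have hyb : y = (b : Int) := by
    by_cases hb : row.getD b 0 = 8
    · rw [if_pos hb] at hy; exact (Option.some_inj.1 hy).symm
    · rw [if_neg hb] at hy; exact absurd hy (by simp)
  rw [hxa, hyb]; exact_mod_cast hab

theorem pairwise_filter_eq {l : List Int} (h : l.Pairwise (· < ·)) (x : Int) :
    l.filter (fun y => y == x) = if x ∈ l then [x] else [] := by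
  induction l with
  | nil => simp
  | cons a t ih =>
    rcases List.pairwise_cons.1 h with ⟨ha, ht⟩
    by_cases hax : a = x
    · subst hax
      have hnot : a ∉ t := fun hm => lt_irrefl a (ha a hm)
      have hnil : t.filter (fun y => y == a) = [] := by
        apply List.filter_eq_nil_iff.2
        intro y hy
        simp only [beq_iff_eq, decide_eq_true_eq]
        intro he
        exact hnot (he ▸ hy)
      simp [List.filter_cons, hnil, hnot]
    · simp [List.filter_cons, hax, ih ht, Ne.symm hax]

theorem getD_set_int {α : Type} (l : List α) (n : Nat) (v : α) (j : Nat) (d : α) :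
    (l.set n v).getD j d = if j = n ∧ n < l.length then v else l.getD j d := by
  rw [List.getD_eq_getElem?_getD, List.getD_eq_getElem?_getD, List.getElem?_set]
  split_ifs with h1 h2 h3 h3 <;> simp_all <;> omega

theorem pySetD_getD {α : Type} (row : List α) (c : Int) (v d : α) (j : Nat) (hc : 0 ≤ c) :
    (PySem.List.pySetD row c v).getD j d =
      if (j : Int) = c ∧ c < (row.length : Int) then v else row.getD j d := by
  rw [PySem.List.pySetD_of_nonneg row v hc, getD_set_int]
  split_ifs with h1 h2 h2 <;> first | rfl | (exfalso; omega)

theorem pySetD_nil {α : Type} (c : Int) (v : α) : PySem.List.pySetD [] c v = ([] : List α) := by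
  simp only [PySem.List.pySetD, PySem.List.pySet?]
  rcases h : PySem.List.pyIdx? 0 c with _ | k <;> simp [h]

theorem pySetD_idem {α : Type} (l : List α) (c : Int) (v : α) (hc : 0 ≤ c) :
    PySem.List.pySetD (PySem.List.pySetD l c v) c v = PySem.List.pySetD l c v := by
  rw [PySem.List.pySetD_of_nonneg l v hc, PySem.List.pySetD_of_nonneg _ v hc, List.set_set]

theorem length_foldl_pySetD {α : Type} (v : α) :
    ∀ (cs : List Int) (row : List α),
      (cs.foldl (fun r c => PySem.List.pySetD r c v) row).length = row.length := by
  intro cs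
  induction cs with
  | nil => intro row; rfl
  | cons c t ih => intro row; rw [List.foldl_cons, ih, PySem.List.length_pySetD]

theorem getD_foldl_pySetD (v d : Int) :
    ∀ (cs : List Int) (row : List Int) (j : Nat), (∀ c ∈ cs, 0 ≤ c) →
      (cs.foldl (fun r c => PySem.List.pySetD r c v) row).getD j d =
        if (j : Int) ∈ cs ∧ (j : Int) < (row.length : Int) then v else row.getD j d := by
  intro cs
  induction cs with
  | nil => intro row j _; simp
  | cons c t ih =>
    intro row j hcs
    rw [List.foldl_cons, ih _ j (fun x hx => hcs x (List.mem_cons_of_mem c hx)),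
      PySem.List.length_pySetD, pySetD_getD row c v d j (hcs c (List.mem_cons_self))]
    by_cases h2 : (j : Int) < (row.length : Int)
    · by_cases h3 : (j : Int) = c
      · have hb : ((j : Int) = c ∧ c < (row.length : Int)) := ⟨h3, by omega⟩
        by_cases h1 : (j : Int) ∈ t <;> simp [h1, h2, h3, hb]
      · by_cases h1 : (j : Int) ∈ t <;> simp [h1, h2, h3]
    · have hnb : ¬ ((j : Int) = c ∧ c < (row.length : Int)) := by
        rintro ⟨h, h'⟩; omega
      by_cases h1 : (j : Int) ∈ t <;> simp [h1, h2, hnb]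

-- ---- pvSet2 (out[r][c] = v) lemmas ----

theorem length_pvSet2 (out : List (List Int)) (r c v : Int) :
    (pvSet2 out r c v).length = out.length := by
  unfold pvSet2; rw [PySem.List.length_pySetD]

theorem getD_pvSet2 (out : List (List Int)) (r c v : Int) (i : Nat) (hr : 0 ≤ r) :
    (pvSet2 out r c v).getD i [] =
      if (i : Int) = r then PySem.List.pySetD (out.getD i []) c v else out.getD i [] := by
  unfold pvSet2
  rw [PySem.List.pySetD_of_nonneg _ _ hr, getD_set_int]
  by_cases hlt : r.toNat < out.length
  · have hget : PySem.List.pyGetD out r [] = out.getD r.toNat [] := by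
      rw [PySem.List.pyGetD_eq_getElem out [] hr (by omega), List.getD_eq_getElem _ _ hlt]
    by_cases hir : (i : Int) = r
    · have hieq : i = r.toNat := by omega
      rw [if_pos ⟨hieq, hlt⟩, if_pos hir, hget, hieq]
    · have hn : ¬ (i = r.toNat ∧ r.toNat < out.length) := by
        rintro ⟨h, _⟩; omega
      rw [if_neg hn, if_neg hir]
  · have h1 : ¬ (i = r.toNat ∧ r.toNat < out.length) := by rintro ⟨_, h⟩; omega
    simp only [h1, if_false]
    by_cases hir : (i : Int) = r
    · have hge : out.length ≤ i := by omega
      rw [List.getD_eq_default _ _ hge, if_pos hir, pySetD_nil]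
    · simp [hir]

theorem getD_foldl_pvSet2_cols (r v : Int) (hr : 0 ≤ r) :
    ∀ (cs : List Int) (out : List (List Int)) (i : Nat),
      ((cs.foldl (fun o c => pvSet2 o r c v) out).getD i []) =
        if (i : Int) = r then cs.foldl (fun row c => PySem.List.pySetD row c v) (out.getD i [])
        else out.getD i [] := by
  intro cs
  induction cs with
  | nil => intro out i; simp
  | cons c t ih =>
    intro out i
    rw [List.foldl_cons, List.foldl_cons, ih, getD_pvSet2 out r c v i hr]
    by_cases h : (i : Int) = r <;> simp [h]

theorem getD_foldl_pvSet2_rows (c v : Int) :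
    ∀ (rs : List Int), (∀ r ∈ rs, 0 ≤ r) → 0 ≤ c → ∀ (out : List (List Int)) (i : Nat),
      ((rs.foldl (fun o r => pvSet2 o r c v) out).getD i []) =
        if (i : Int) ∈ rs then PySem.List.pySetD (out.getD i []) c v else out.getD i [] := by
  intro rs
  induction rs with
  | nil => intro _ _ out i; simp
  | cons r t ih =>
    intro h0 hc out i
    rw [List.foldl_cons, ih (fun x hx => h0 x (List.mem_cons_of_mem r hx)) hc,
      getD_pvSet2 out r c v i (h0 r List.mem_cons_self)]
    by_cases h1 : (i : Int) ∈ t <;> by_cases h2 : (i : Int) = r <;>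
      simp [h1, h2, pySetD_idem _ c v hc]

-- ---- generic fold-shape lemmas ----

theorem length_foldl_preserve {γ : Type} (F : List (List Int) → γ → List (List Int))
    (hF : ∀ o x, (F o x).length = o.length) :
    ∀ (l : List γ) (out : List (List Int)), (l.foldl F out).length = out.length := by
  intro l
  induction l with
  | nil => intro out; rfl
  | cons x t ih => intro out; rw [List.foldl_cons, ih, hF]

theorem length_foldl_preserve_row {γ : Type} (F : List Int → γ → List Int)
    (hF : ∀ o x, (F o x).length = o.length) :
    ∀ (l : List γ) (row : List Int), (l.foldl F row).length = row.length := by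
  intro l
  induction l with
  | nil => intro row; rfl
  | cons x t ih => intro row; rw [List.foldl_cons, ih, hF]

theorem foldl_key_skip {γ β : Type} (i : Int) (F : γ → β → γ) :
    ∀ (its : List (Int × β)) (r0 : γ), (∀ p ∈ its, p.1 ≠ i) →
      its.foldl (fun r p => if p.1 = i then F r p.2 else r) r0 = r0 := by
  intro its
  induction its with
  | nil => intro r0 _; rfl
  | cons q t ih =>
    intro r0 h
    rw [List.foldl_cons, if_neg (h q List.mem_cons_self)]
    exact ih r0 (fun p hp => h p (List.mem_cons_of_mem q hp))

theorem foldl_key_apply {γ β : Type} (i : Int) (F : γ → β → γ) :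
    ∀ (its : List (Int × β)) (r0 : γ), ((its.map Prod.fst).Nodup) →
      its.foldl (fun r p => if p.1 = i then F r p.2 else r) r0 =
        (match its.find? (fun p => p.1 == i) with
          | some q => F r0 q.2
          | none => r0) := by
  intro its
  induction its with
  | nil => intro r0 _; rfl
  | cons q t ih =>
    intro r0 hnd
    rw [List.map_cons] at hnd
    rcases List.nodup_cons.1 hnd with ⟨hq, ht⟩
    by_cases hqi : q.1 = i
    · rw [List.foldl_cons, if_pos hqi, List.find?_cons_of_pos (by simp [hqi])]
      apply foldl_key_skip
      intro p hp hpe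
      exact hq (List.mem_map.2 ⟨p, hp, by rw [hpe, hqi]⟩)
    · rw [List.foldl_cons, if_neg hqi, List.find?_cons_of_neg (by simp [hqi])]
      exact ih r0 ht

theorem getD_foldl_cond_pySetD {β : Type} (P : Int × β → Prop) [DecidablePred P] :
    ∀ (its : List (Int × β)) (row : List Int) (j : Nat), (∀ p ∈ its, 0 ≤ p.1) →
      ((its.foldl (fun row p => if P p then PySem.List.pySetD row p.1 8 else row) row).getD j 0) =
        if (∃ p ∈ its, P p ∧ p.1 = (j : Int)) ∧ (j : Int) < (row.length : Int) then 8
        else row.getD j 0 := by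
  intro its
  induction its with
  | nil => intro row j _; simp
  | cons q t ih =>
    intro row j h0
    rw [List.foldl_cons]
    by_cases hPq : P q
    · rw [if_pos hPq, ih _ j (fun p hp => h0 p (List.mem_cons_of_mem q hp)),
        PySem.List.length_pySetD, pySetD_getD row q.1 8 0 j (h0 q List.mem_cons_self)]
      by_cases hlen : (j : Int) < (row.length : Int)
      · by_cases hex : ∃ p ∈ t, P p ∧ p.1 = (j : Int)
        · rcases hex with ⟨p, hp, h⟩
          rw [if_pos ⟨⟨p, hp, h⟩, hlen⟩,
            if_pos ⟨⟨p, List.mem_cons_of_mem q hp, h⟩, hlen⟩]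
        · rw [if_neg (fun h => hex h.1)]
          by_cases hqj : q.1 = (j : Int)
          · rw [if_pos ⟨hqj.symm, by omega⟩,
              if_pos ⟨⟨q, List.mem_cons_self, hPq, hqj⟩, hlen⟩]
          · rw [if_neg (fun h => hqj (by omega)), if_neg ?_]
            rintro ⟨⟨p, hp, hPp, hpj⟩, -⟩
            rcases List.mem_cons.1 hp with rfl | hp'
            · exact hqj hpj
            · exact hex ⟨p, hp', hPp, hpj⟩
      · have hni : ¬ ((j : Int) = q.1 ∧ q.1 < (row.length : Int)) := by
          rintro ⟨h, h'⟩; omega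
        rw [if_neg (fun h => hlen h.2), if_neg hni, if_neg (fun h => hlen h.2)]
    · rw [if_neg hPq, ih _ j (fun p hp => h0 p (List.mem_cons_of_mem q hp))]
      have hiff : (∃ p ∈ q :: t, P p ∧ p.1 = (j : Int)) ↔ (∃ p ∈ t, P p ∧ p.1 = (j : Int)) := by
        constructor
        · rintro ⟨p, hp, hPp, hpj⟩
          rcases List.mem_cons.1 hp with rfl | hp'
          · exact absurd hPp hPq
          · exact ⟨p, hp', hPp, hpj⟩
        · rintro ⟨p, hp, h⟩
          exact ⟨p, List.mem_cons_of_mem q hp, h⟩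
      by_cases hC : (∃ p ∈ t, P p ∧ p.1 = (j : Int)) ∧ (j : Int) < (row.length : Int)
      · rw [if_pos hC, if_pos ⟨hiff.2 hC.1, hC.2⟩]
      · rw [if_neg hC, if_neg (fun h => hC ⟨hiff.1 h.1, h.2⟩)]

-- ---- dict lemmas ----

theorem nodup_keys_foldl_modify {β : Type} :
    ∀ (l : List (Int × β)) (d : PySem.Dict Int (List β)), d.keys.Nodup →
      ((l.foldl (fun d p => d.modify p.1 [] (· ++ [p.2])) d).keys.Nodup) := by
  intro l
  induction l with
  | nil => intro d h; exact h
  | cons p t ih =>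
    intro d h
    rw [List.foldl_cons]
    apply ih
    have := PySem.Dict.keys_modify d p.1 [] (· ++ [p.2])
    have h2 := PySem.Dict.nodup_keys_insert d p.1 ((d.getD p.1 []) ++ [p.2]) h
    simpa [PySem.Dict.keys] using (by rw [this]; exact h2 :
      ((d.modify p.1 [] (· ++ [p.2])).keys).Nodup)

theorem find?_items_some {d : PySem.Dict Int (List Int)} (hn : d.keys.Nodup) {i : Int}
    {q : Int × List Int} (h : d.items.find? (fun p => p.1 == i) = some q) :
    q.1 = i ∧ q.2 = d.getD i [] := by
  have hq1 : q.1 = i := by simpa using List.find?_some h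
  have hmem : q ∈ d.items := List.mem_of_find?_eq_some h
  have : (i, q.2) ∈ d.items := by rw [← hq1]; exact hmem
  exact ⟨hq1, (PySem.Dict.getD_of_mem_items d this hn []).symm⟩

theorem find?_items_none {d : PySem.Dict Int (List Int)} {i : Int}
    (h : d.items.find? (fun p => p.1 == i) = none) : d.getD i [] = [] := by
  rw [PySem.Dict.getD_eq_get?_getD]
  cases hg : d.get? i with
  | none => rfl
  | some v =>
    exfalso
    have hmem := PySem.Dict.mem_items_of_get?_eq_some d hg
    have := List.find?_eq_none.1 h _ hmem
    simp at this

theorem dict_fold_apply {γ : Type} (d : PySem.Dict Int (List Int)) (hn : d.keys.Nodup)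
    (F : γ → List Int → γ) (r0 : γ) (hF : F r0 [] = r0) (i : Int) :
    d.items.foldl (fun r p => if p.1 = i then F r p.2 else r) r0 = F r0 (d.getD i []) := by
  rw [foldl_key_apply i F d.items r0 (by simpa [PySem.Dict.keys] using hn)]
  cases hf : d.items.find? (fun p => p.1 == i) with
  | none =>
    show r0 = F r0 (d.getD i [])
    rw [find?_items_none hf, hF]
  | some q =>
    show F r0 q.2 = F r0 (d.getD i [])
    rw [(find?_items_some hn hf).2]

-- ---- the eights list and its groupings ----

theorem flatMap_range_single {α : Type} (G : List α) :
    ∀ (n i : Nat) (f : Nat → List α), i < n → (∀ r, r ≠ i → f r = []) → f i = G →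
      (List.range n).flatMap f = G := by
  intro n
  induction n with
  | zero => intro i f h; omega
  | succ k ih =>
    intro i f hi hne hfi
    rw [List.range_succ, List.flatMap_append]
    by_cases hik : i = k
    · subst hik
      rw [List.flatMap_eq_nil_iff.2 (fun r hr => hne r (by simp at hr; omega))]
      simp [hfi]
    · rw [ih i f (by omega) hne hfi]
      simp [hne k (by omega)]

theorem flatMap_if_singleton {α β : Type} (P : α → Prop) [DecidablePred P] (g : α → β) :
    ∀ (l : List α), l.flatMap (fun r => if P r then [g r] else []) =
      l.filterMap (fun r => if P r then some (g r) else none) := by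
  intro l
  induction l with
  | nil => rfl
  | cons a t ih =>
    by_cases h : P a <;> simp [h, ih]

-- the eights list of A
def eightsL (grid : List (List Int)) (m : Nat) : List (Int × Int) :=
  (List.range grid.length).flatMap (fun r =>
    (List.range m).filterMap (fun c =>
      if (grid.getD r []).getD c 0 = 8 then some ((r : Int), (c : Int)) else none))

theorem eights_group (grid : List (List Int)) (m : Nat) (r : Nat) :
    (List.range m).filterMap (fun c =>
        if (grid.getD r []).getD c 0 = 8 then some ((r : Int), (c : Int)) else none) =
      (rowPosL m (grid.getD r [])).map (fun c => ((r : Int), c)) := by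
  rw [rowPosL, List.map_filterMap]
  apply List.filterMap_congr
  intro c _
  by_cases h : (grid.getD r []).getD c 0 = 8 <;> simp [h]

theorem eights_filter_row (grid : List (List Int)) (m : Nat) (i : Nat) (hi : i < grid.length) :
    (eightsL grid m).filter (fun p => p.1 == (i : Int)) =
      (rowPosL m (grid.getD i [])).map (fun c => ((i : Int), c)) := by
  unfold eightsL
  rw [List.filter_flatMap]
  apply flatMap_range_single _ grid.length i _ hi
  · intro r hr
    rw [eights_group, List.filter_map, List.filter_eq_nil_iff.2 ?_]
    · simp
    · intro c _
      simp only [Function.comp_apply]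
      simp only [beq_iff_eq, decide_eq_true_eq]
      intro h
      exact hr (by exact_mod_cast h)
  · rw [eights_group, List.filter_map, List.filter_eq_self.2 ?_]
    intro c _
    simp

theorem eights_filter_col (grid : List (List Int)) (m : Nat) (j : Nat) (hj : j < m) :
    (((eightsL grid m).map Prod.swap).filter (fun p => p.1 == (j : Int))).map Prod.snd =
      colPosL grid j := by
  unfold eightsL colPosL
  rw [List.map_flatMap, List.filter_flatMap, List.map_flatMap]
  rw [← flatMap_if_singleton (fun r => (grid.getD r []).getD j 0 = 8) (fun r => (r : Int))]
  apply List.flatMap_congr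
  intro r _
  rw [eights_group, List.map_map]
  have hswap : (Prod.swap ∘ fun c => ((r : Int), c)) = (fun c : Int => (c, (r : Int))) := by
    funext c; rfl
  rw [hswap, List.filter_map]
  have hpred : ((fun p : Int × Int => p.1 == (j : Int)) ∘ fun c : Int => (c, (r : Int))) =
      (fun c : Int => c == (j : Int)) := by
    funext c; rfl
  rw [hpred, pairwise_filter_eq (rowPosL_pairwise m _) (j : Int), List.map_map]
  by_cases h8 : (grid.getD r []).getD j 0 = 8
  · rw [if_pos (mem_rowPosL.2 ⟨j, hj, rfl, h8⟩), if_pos h8]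
    rfl
  · rw [if_neg ?_, if_neg h8]
    · rfl
    · intro hmem
      rcases mem_rowPosL.1 hmem with ⟨c, _, hc, h8c⟩
      have : c = j := by exact_mod_cast hc.symm
      exact h8 (this ▸ h8c)

-- ---- rowStep characterization ----

theorem rowStep_length (row cs : List Int) : (rowStep row cs).length = row.length := by
  unfold rowStep
  split_ifs with h
  · rw [length_foldl_pySetD]
  · rfl

theorem sorted_two {cs : List Int} (hp : cs.Pairwise (· < ·)) (h2 : cs.length = 2) :
    ∃ a b : Int, cs = [a, b] ∧ a < b ∧
      PySem.List.sorted cs (fun x => x) false = [a, b] := by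
  rcases List.length_eq_two.1 h2 with ⟨a, b, rfl⟩
  refine ⟨a, b, rfl, ?_, ?_⟩
  · simpa using hp
  · exact PySem.List.sorted_eq_self_of_pairwise _ _ (hp.imp le_of_lt)

theorem rowStep_getD (row cs : List Int) (j : Nat) (hp : cs.Pairwise (· < ·))
    (h0 : ∀ x ∈ cs, 0 ≤ x) :
    (rowStep row cs).getD j 0 =
      if cs.length = 2 ∧ cs.getD 0 0 ≤ (j : Int) ∧ (j : Int) ≤ cs.getD 1 0 ∧
          (j : Int) < (row.length : Int) then 8
      else row.getD j 0 := by
  unfold rowStep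
  by_cases h2 : cs.length = 2
  · rcases sorted_two hp h2 with ⟨a, b, rfl, hab, hs⟩
    rw [if_pos h2, hs]
    simp only [List.getD_cons_zero, List.getD_cons_succ]
    have hrange : ∀ c ∈ PySem.List.pyRange a (b + 1) 1, 0 ≤ c := by
      intro c hc
      have := PySem.List.mem_pyRange_one.1 hc
      have ha := h0 a (by simp)
      omega
    rw [getD_foldl_pySetD 8 0 _ row j hrange]
    simp only [PySem.List.mem_pyRange_one]
    by_cases hx : a ≤ (j : Int) ∧ (j : Int) ≤ b <;> by_cases hy : (j : Int) < (row.length : Int) <;>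
      simp_all <;> omega
  · rw [if_neg h2]
    simp [h2]

-- ---- B-side fold and pvPair characterization ----

theorem length_foldl_range_set (P : Nat → Bool) (n : Nat) (row : List Int) :
    ((List.range n).foldl (fun new c =>
      if P c then PySem.List.pySetD new ((c : Nat) : Int) 8 else new) row).length = row.length := by
  apply length_foldl_preserve_row
  intro o c
  split_ifs with h
  · exact PySem.List.length_pySetD o _ 8
  · rfl

theorem getD_foldl_range_set (P : Nat → Bool) :
    ∀ (n : Nat) (row : List Int) (j : Nat),
      ((List.range n).foldl (fun new c =>
          if P c then PySem.List.pySetD new ((c : Nat) : Int) 8 else new) row).getD j 0 =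
        if P j = true ∧ j < n ∧ (j : Int) < (row.length : Int) then 8 else row.getD j 0 := by
  intro n
  induction n with
  | zero => intro row j; simp
  | succ k ih =>
    intro row j
    rw [List.range_succ, List.foldl_append, List.foldl_cons, List.foldl_nil]
    by_cases hPk : P k = true
    · rw [if_pos hPk, pySetD_getD _ _ 8 0 j (Int.natCast_nonneg k),
        length_foldl_range_set P k row, ih row j]
      by_cases hjlen : (j : Int) < (row.length : Int)
      · by_cases hjk : j = k
        · subst hjk
          rw [if_pos ⟨rfl, by omega⟩, if_pos ⟨hPk, by omega, hjlen⟩]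
        · have h1 : ¬ ((j : Int) = (k : Int) ∧ (k : Int) < (row.length : Int)) := by
            rintro ⟨h, -⟩
            exact hjk (by exact_mod_cast h)
          rw [if_neg h1]
          by_cases hPj : P j = true
          · by_cases hjk2 : j < k
            · rw [if_pos ⟨hPj, hjk2, hjlen⟩, if_pos ⟨hPj, by omega, hjlen⟩]
            · rw [if_neg (fun h => hjk2 h.2.1), if_neg (fun h => hjk2 (by omega : j < k))]
          · rw [if_neg (fun h => hPj h.1), if_neg (fun h => hPj h.1)]
      · rw [if_neg (by rintro ⟨h, h'⟩; omega), if_neg (fun h => hjlen h.2.2),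
          if_neg (fun h => hjlen h.2.2)]
    · rw [if_neg hPk, ih row j]
      by_cases hPj : P j = true
      · have hjk : j ≠ k := fun h => hPk (h ▸ hPj)
        by_cases hC : j < k ∧ (j : Int) < (row.length : Int)
        · rw [if_pos ⟨hPj, hC.1, hC.2⟩, if_pos ⟨hPj, by omega, hC.2⟩]
        · rw [if_neg (fun h => hC ⟨h.2.1, h.2.2⟩), if_neg (fun h => hC ⟨by omega, h.2.2⟩)]
      · rw [if_neg (fun h => hPj h.1), if_neg (fun h => hPj h.1)]

theorem pvPair_match_eq (l : List Int) (x : Int) :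
    (match pvPair l with
      | some ps => decide (ps.getD 0 0 ≤ x ∧ x ≤ ps.getD 1 0)
      | none => false) =
    decide (l.length = 2 ∧ l.getD 0 0 ≤ x ∧ x ≤ l.getD 1 0) := by
  unfold pvPair
  by_cases h2 : l.length = 2
  · rw [if_pos h2]
    show decide (l.getD 0 0 ≤ x ∧ x ≤ l.getD 1 0) = _
    exact decide_eq_decide.2 ⟨fun ⟨a, b⟩ => ⟨h2, a, b⟩, fun ⟨_, a, b⟩ => ⟨a, b⟩⟩
  · rw [if_neg h2]
    show false = _
    exact (decide_eq_false (fun h => h2 h.1)).symm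

-- column list read by B equals the column positions list
theorem rowPosL_colvals (grid : List (List Int)) (c : Nat) :
    rowPosL grid.length (grid.map (fun row => row.getD c 0)) = colPosL grid c := by
  unfold rowPosL colPosL
  apply List.filterMap_congr
  intro r hr
  have hrlt : r < grid.length := List.mem_range.1 hr
  have : (grid.map (fun row => row.getD c 0)).getD r 0 = (grid.getD r []).getD c 0 := by
    rw [List.getD_eq_getElem _ _ (by simpa using hrlt), List.getElem_map,
      List.getD_eq_getElem _ _ hrlt]
  rw [this]

-- ===== MAIN PROOF =====

theorem mem_eightsL {grid : List (List Int)} {m : Nat} {p : Int × Int}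
    (h : p ∈ eightsL grid m) :
    ∃ (r c : Nat), r < grid.length ∧ c < m ∧ p = ((r : Int), (c : Int)) ∧
      (grid.getD r []).getD c 0 = 8 := by
  unfold eightsL at h
  rcases List.mem_flatMap.1 h with ⟨r, hr, hp⟩
  rcases List.mem_filterMap.1 hp with ⟨c, hc, hpc⟩
  by_cases h8 : (grid.getD r []).getD c 0 = 8
  · rw [if_pos h8] at hpc
    exact ⟨r, c, List.mem_range.1 hr, List.mem_range.1 hc, (Option.some_inj.1 hpc).symm, h8⟩
  · rw [if_neg h8] at hpc
    exact absurd hpc (by simp)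

theorem mem_keys_foldl_modify {β : Type} :
    ∀ (l : List (Int × β)) (d : PySem.Dict Int (List β)) (k : Int),
      k ∈ (l.foldl (fun d p => d.modify p.1 [] (· ++ [p.2])) d).keys →
        k ∈ d.keys ∨ k ∈ l.map Prod.fst := by
  intro l
  induction l with
  | nil => intro d k h; exact Or.inl h
  | cons q t ih =>
    intro d k h
    rw [List.foldl_cons] at h
    rcases ih _ k h with h1 | h2
    · rw [PySem.Dict.keys_modify] at h1
      rcases (PySem.Dict.mem_keys_insert _ _ _ _).1 h1 with h3 | h4
      · exact Or.inr (by simp [h3])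
      · exact Or.inl h4
    · exact Or.inr (List.mem_cons_of_mem _ h2)

theorem rowStep_nil (row : List Int) : rowStep row [] = row := by
  unfold rowStep; simp

theorem getD_rowpass (its : List (Int × List Int)) :
    ∀ (out : List (List Int)) (i : Nat), (∀ p ∈ its, 0 ≤ p.1) →
      ((its.foldl (fun out p =>
          if p.2.length = 2 then
            (PySem.List.pyRange ((PySem.List.sorted p.2 (fun x => x) false).getD 0 0)
              ((PySem.List.sorted p.2 (fun x => x) false).getD 1 0 + 1) 1).foldl
              (fun out c => pvSet2 out p.1 c 8) out
          else out) out).getD i [])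
        = its.foldl (fun row p => if p.1 = (i : Int) then rowStep row p.2 else row)
            (out.getD i []) := by
  induction its with
  | nil => intro out i _; rfl
  | cons q t ih =>
    intro out i h0
    rw [List.foldl_cons, List.foldl_cons, ih _ i (fun p hp => h0 p (List.mem_cons_of_mem q hp))]
    congr 1
    by_cases h2 : q.2.length = 2
    · rw [if_pos h2, getD_foldl_pvSet2_cols q.1 8 (h0 q List.mem_cons_self)]
      unfold rowStep
      rw [if_pos h2]
      by_cases hiq : (i : Int) = q.1
      · rw [if_pos hiq, if_pos hiq.symm]
      · rw [if_neg hiq, if_neg (fun h => hiq h.symm)]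
    · rw [if_neg h2]
      unfold rowStep
      by_cases hiq : q.1 = (i : Int)
      · rw [if_pos hiq, if_neg h2]
      · rw [if_neg hiq]

theorem getD_colpass (its : List (Int × List Int)) :
    ∀ (out : List (List Int)) (i : Nat), (∀ p ∈ its, 0 ≤ p.1) →
      (∀ p ∈ its, ∀ x ∈ p.2, 0 ≤ x) →
      ((its.foldl (fun out p =>
          if p.2.length = 2 then
            (PySem.List.pyRange ((PySem.List.sorted p.2 (fun x => x) false).getD 0 0)
              ((PySem.List.sorted p.2 (fun x => x) false).getD 1 0 + 1) 1).foldl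
              (fun out r => pvSet2 out r p.1 8) out
          else out) out).getD i [])
        = its.foldl (fun row p =>
            if ((PySem.List.sorted p.2 (fun x => x) false).getD 0 0 ≤ (i : Int) ∧
                (i : Int) ≤ (PySem.List.sorted p.2 (fun x => x) false).getD 1 0) ∧
                p.2.length = 2 then
              PySem.List.pySetD row p.1 8 else row) (out.getD i []) := by
  induction its with
  | nil => intro out i _ _; rfl
  | cons q t ih =>
    intro out i h0 hv
    rw [List.foldl_cons, List.foldl_cons,
      ih _ i (fun p hp => h0 p (List.mem_cons_of_mem q hp))
        (fun p hp => hv p (List.mem_cons_of_mem q hp))]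
    congr 1
    by_cases h2 : q.2.length = 2
    · have hs2 : (PySem.List.sorted q.2 (fun x => x) false).length = 2 := by
        rw [PySem.List.length_sorted]; exact h2
      rcases List.length_eq_two.1 hs2 with ⟨a, b, hab⟩
      have ha : 0 ≤ a := hv q List.mem_cons_self a
        ((PySem.List.mem_sorted q.2 (fun x => x) false a).1 (by rw [hab]; simp))
      have hrange : ∀ r ∈ PySem.List.pyRange
          ((PySem.List.sorted q.2 (fun x => x) false).getD 0 0)
          ((PySem.List.sorted q.2 (fun x => x) false).getD 1 0 + 1) 1, 0 ≤ r := by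
        intro r hr
        have := PySem.List.mem_pyRange_one.1 hr
        rw [hab] at this
        simp only [List.getD_cons_zero] at this
        omega
      rw [if_pos h2, getD_foldl_pvSet2_rows q.1 8 _ hrange (h0 q List.mem_cons_self) out i]
      by_cases hmem : (i : Int) ∈ PySem.List.pyRange
          ((PySem.List.sorted q.2 (fun x => x) false).getD 0 0)
          ((PySem.List.sorted q.2 (fun x => x) false).getD 1 0 + 1) 1
      · have hb := PySem.List.mem_pyRange_one.1 hmem
        rw [if_pos hmem, if_pos ⟨⟨hb.1, by omega⟩, h2⟩]
      · have hb : ¬ ((PySem.List.sorted q.2 (fun x => x) false).getD 0 0 ≤ (i : Int) ∧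
            (i : Int) ≤ (PySem.List.sorted q.2 (fun x => x) false).getD 1 0) := by
          intro hc
          exact hmem (PySem.List.mem_pyRange_one.2 ⟨hc.1, by omega⟩)
        rw [if_neg hmem, if_neg (fun h => hb h.1)]
    · rw [if_neg h2, if_neg (fun h => h2 h.2)]

-- the dictionaries A builds
def byRowD (grid : List (List Int)) (m : Nat) : PySem.Dict Int (List Int) :=
  (eightsL grid m).foldl (fun d p => d.modify p.1 [] (· ++ [p.2])) PySem.Dict.empty

def byColD (grid : List (List Int)) (m : Nat) : PySem.Dict Int (List Int) :=
  (eightsL grid m).foldl (fun d p => d.modify p.2 [] (· ++ [p.1])) PySem.Dict.empty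

theorem byColD_eq (grid : List (List Int)) (m : Nat) :
    byColD grid m = ((eightsL grid m).map Prod.swap).foldl
      (fun d p => d.modify p.1 [] (· ++ [p.2])) PySem.Dict.empty := by
  unfold byColD
  rw [List.foldl_map]
  rfl

theorem byRowD_getD (grid : List (List Int)) (m : Nat) (i : Nat) (hi : i < grid.length) :
    (byRowD grid m).getD (i : Int) [] = rowPosL m (grid.getD i []) := by
  unfold byRowD
  rw [PySem.Dict.getD_foldl_modify_append, PySem.Dict.getD_empty,
    eights_filter_row grid m i hi, List.map_map]
  simp

theorem byColD_getD (grid : List (List Int)) (m : Nat) (j : Nat) (hj : j < m) :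
    (byColD grid m).getD (j : Int) [] = colPosL grid j := by
  rw [byColD_eq, PySem.Dict.getD_foldl_modify_append, PySem.Dict.getD_empty,
    eights_filter_col grid m j hj]
  rfl

theorem byRowD_nodup (grid : List (List Int)) (m : Nat) : (byRowD grid m).keys.Nodup :=
  nodup_keys_foldl_modify _ _ PySem.Dict.nodup_keys_empty

theorem byColD_nodup (grid : List (List Int)) (m : Nat) : (byColD grid m).keys.Nodup := by
  rw [byColD_eq]
  exact nodup_keys_foldl_modify _ _ PySem.Dict.nodup_keys_empty

theorem byRowD_items_nonneg (grid : List (List Int)) (m : Nat) :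
    ∀ p ∈ (byRowD grid m).items, 0 ≤ p.1 := by
  intro p hp
  have hk : p.1 ∈ (byRowD grid m).keys := List.mem_map_of_mem hp
  rcases mem_keys_foldl_modify _ _ _ hk with h | h
  · simp [PySem.Dict.keys, PySem.Dict.empty] at h
  · rcases List.mem_map.1 h with ⟨q, hq, hq1⟩
    rcases mem_eightsL hq with ⟨r, c, _, _, rfl, _⟩
    rw [← hq1]; exact Int.natCast_nonneg r

theorem byColD_items_nonneg (grid : List (List Int)) (m : Nat) :
    ∀ p ∈ (byColD grid m).items, 0 ≤ p.1 := by
  intro p hp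
  rw [byColD_eq] at hp
  have hk : p.1 ∈ (((eightsL grid m).map Prod.swap).foldl
      (fun d p => d.modify p.1 [] (· ++ [p.2])) PySem.Dict.empty).keys := List.mem_map_of_mem hp
  rcases mem_keys_foldl_modify _ _ _ hk with h | h
  · simp [PySem.Dict.keys, PySem.Dict.empty] at h
  · rw [List.map_map] at h
    rcases List.mem_map.1 h with ⟨q, hq, hq1⟩
    rcases mem_eightsL hq with ⟨r, c, _, _, rfl, _⟩
    rw [← hq1]; exact Int.natCast_nonneg c

theorem byColD_items_val_nonneg (grid : List (List Int)) (m : Nat) :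
    ∀ p ∈ (byColD grid m).items, ∀ x ∈ p.2, 0 ≤ x := by
  intro p hp x hx
  have h2 := PySem.Dict.getD_of_mem_items _ hp (byColD_nodup grid m) []
  rw [byColD_eq, PySem.Dict.getD_foldl_modify_append, PySem.Dict.getD_empty] at h2
  rw [← h2] at hx
  simp only [List.nil_append, List.mem_map, List.mem_filter] at hx
  rcases hx with ⟨q, ⟨hq, _⟩, hq2⟩
  rcases hq with ⟨w, hw, hwq⟩
  rcases mem_eightsL hw with ⟨r, c, _, _, rfl, _⟩
  rw [← hq2, ← hwq]
  exact Int.natCast_nonneg r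

theorem colPosL_eq_rowPosL (grid : List (List Int)) (c : Nat) :
    colPosL grid c = rowPosL grid.length (grid.map (fun row => row.getD c 0)) :=
  (rowPosL_colvals grid c).symm

theorem colPosL_pairwise (grid : List (List Int)) (c : Nat) :
    (colPosL grid c).Pairwise (· < ·) := by
  rw [colPosL_eq_rowPosL]; exact rowPosL_pairwise _ _

theorem rowPosL_lt {m : Nat} {row : List Int} {x : Int} (h : x ∈ rowPosL m row) :
    x < (m : Int) := by
  rcases mem_rowPosL.1 h with ⟨c, hc, rfl, _⟩; exact_mod_cast hc

theorem byColD_items_lt (grid : List (List Int)) (m : Nat) :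
    ∀ p ∈ (byColD grid m).items, p.1 < (m : Int) := by
  intro p hp
  rw [byColD_eq] at hp
  have hk : p.1 ∈ (((eightsL grid m).map Prod.swap).foldl
      (fun d p => d.modify p.1 [] (· ++ [p.2])) PySem.Dict.empty).keys := List.mem_map_of_mem hp
  rcases mem_keys_foldl_modify _ _ _ hk with h | h
  · simp [PySem.Dict.keys, PySem.Dict.empty] at h
  · rw [List.map_map] at h
    rcases List.mem_map.1 h with ⟨q, hq, hq1⟩
    rcases mem_eightsL hq with ⟨r, c, _, hcm, rfl, _⟩
    rw [← hq1]
    have hc' : ((c : Nat) : Int) < ((m : Nat) : Int) := by exact_mod_cast hcm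
    exact hc'

theorem solve_eq_cells (grid : List (List Int))
    (hge : ∀ row ∈ grid, (grid.headD []).length ≤ row.length) :
    solve_ded97339 grid = solve_ded97339_alt grid := by
  have hA : solve_ded97339 grid =
      (byColD grid (grid.headD []).length).items.foldl
        (fun out p =>
          if p.2.length = 2 then
            (PySem.List.pyRange ((PySem.List.sorted p.2 (fun x => x) false).getD 0 0)
              ((PySem.List.sorted p.2 (fun x => x) false).getD 1 0 + 1) 1).foldl
              (fun out r => pvSet2 out r p.1 8) out
          else out)
        ((byRowD grid (grid.headD []).length).items.foldl
          (fun out p =>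
            if p.2.length = 2 then
              (PySem.List.pyRange ((PySem.List.sorted p.2 (fun x => x) false).getD 0 0)
                ((PySem.List.sorted p.2 (fun x => x) false).getD 1 0 + 1) 1).foldl
                (fun out c => pvSet2 out p.1 c 8) out
            else out)
          grid) := by
    have hout0 : grid.map (fun row => PySem.List.slice row none none) = grid := by
      simp [PySem.List.slice_none_none]
    simp only [solve_ded97339, byRowD, byColD, eightsL, hout0]
    rw [PySem.List.foldl_prod_mk
      (fun (d : PySem.Dict Int (List Int)) (p : Int × Int) => d.modify p.1 [] (· ++ [p.2]))
      (fun (d : PySem.Dict Int (List Int)) (p : Int × Int) => d.modify p.2 [] (· ++ [p.1]))]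
  rw [hA]
  have hsteprow : ∀ (o : List (List Int)) (p : Int × List Int),
      ((if p.2.length = 2 then
          (PySem.List.pyRange ((PySem.List.sorted p.2 (fun x => x) false).getD 0 0)
            ((PySem.List.sorted p.2 (fun x => x) false).getD 1 0 + 1) 1).foldl
            (fun out c => pvSet2 out p.1 c 8) o
        else o)).length = o.length := by
    intro o p
    split_ifs with h
    · exact length_foldl_preserve _ (fun o' c => length_pvSet2 o' p.1 c 8) _ o
    · rfl
  have hstepcol : ∀ (o : List (List Int)) (p : Int × List Int),
      ((if p.2.length = 2 then
          (PySem.List.pyRange ((PySem.List.sorted p.2 (fun x => x) false).getD 0 0)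
            ((PySem.List.sorted p.2 (fun x => x) false).getD 1 0 + 1) 1).foldl
            (fun out r => pvSet2 out r p.1 8) o
        else o)).length = o.length := by
    intro o p
    split_ifs with h
    · exact length_foldl_preserve _ (fun o' r => length_pvSet2 o' r p.1 8) _ o
    · rfl
  apply List.ext_getElem
  · rw [length_foldl_preserve _ hstepcol, length_foldl_preserve _ hsteprow]
    simp [solve_ded97339_alt, PySem.List.length_enumerate]
  intro i h1 h2
  have hi : i < grid.length := by
    rw [length_foldl_preserve _ hstepcol, length_foldl_preserve _ hsteprow] at h1
    exact h1
  have hgi_mem : grid.getD i [] ∈ grid := by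
    rw [List.getD_eq_getElem _ _ hi]
    exact List.getElem_mem hi
  have hgl : (grid.headD []).length ≤ (grid.getD i []).length := hge _ hgi_mem
  -- row i of A
  rw [← List.getD_eq_getElem _ [] h1,
    getD_colpass _ _ i (byColD_items_nonneg grid _) (byColD_items_val_nonneg grid _),
    getD_rowpass _ _ i (byRowD_items_nonneg grid _),
    dict_fold_apply _ (byRowD_nodup grid _) rowStep _ (rowStep_nil _) (i : Int),
    byRowD_getD grid _ i hi]
  -- row i of B
  simp only [solve_ded97339_alt]
  rw [List.getElem_map, PySem.List.getElem_enumerate]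
  simp only [zero_add]
  rw [← List.getD_eq_getElem grid [] hi]
  have hFrow : ∀ (o : List Int) (p : Int × List Int),
      ((if ((PySem.List.sorted p.2 (fun x => x) false).getD 0 0 ≤ (i : Int) ∧
            (i : Int) ≤ (PySem.List.sorted p.2 (fun x => x) false).getD 1 0) ∧
            p.2.length = 2 then PySem.List.pySetD o p.1 8 else o)).length = o.length := by
    intro o p
    split_ifs with h
    · exact PySem.List.length_pySetD o p.1 8
    · rfl
  apply List.ext_getElem
  · rw [length_foldl_preserve_row _ hFrow, rowStep_length]
    exact (length_foldl_range_set _ _ _).symm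
  intro j hj1 hj2
  have hjL : j < (grid.getD i []).length := by
    rw [length_foldl_preserve_row _ hFrow, rowStep_length] at hj1
    exact hj1
  have hjLi : (j : Int) < ((grid.getD i []).length : Int) := by exact_mod_cast hjL
  rw [← List.getD_eq_getElem _ 0 hj1,
    getD_foldl_cond_pySetD _ _ _ j (byColD_items_nonneg grid _),
    rowStep_length,
    rowStep_getD _ _ j (rowPosL_pairwise _ _) (fun x hx => rowPosL_nonneg hx)]
  rw [← List.getD_eq_getElem _ 0 hj2, getD_foldl_range_set]
  have hX : (List.range (grid.headD []).length).filterMap (fun c =>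
      if (grid.getD i []).getD c 0 = 8 then some ((c : Int)) else none) =
      rowPosL (grid.headD []).length (grid.getD i []) := rfl
  rw [hX]
  by_cases hjm : j < (grid.headD []).length
  · -- j is one of the first cols columns
    have hcp : ((List.range (grid.headD []).length).map (fun c =>
        pvPair ((List.range grid.length).filterMap (fun r =>
          if (grid.getD r []).getD c 0 = 8 then some ((r : Int)) else none)))).getD j none =
        pvPair (colPosL grid j) := by
      rw [List.getD_eq_getElem _ _ (by simpa using hjm), List.getElem_map, List.getElem_range]
      rfl
    rw [hcp, pvPair_match_eq, pvPair_match_eq]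
    have hCpair := colPosL_pairwise grid j
    have hsortC : PySem.List.sorted (colPosL grid j) (fun x => x) false = colPosL grid j :=
      PySem.List.sorted_eq_self_of_pairwise _ _ (hCpair.imp le_of_lt)
    have hex_iff : (∃ p ∈ (byColD grid (grid.headD []).length).items,
          (((PySem.List.sorted p.2 (fun x => x) false).getD 0 0 ≤ (i : Int) ∧
            (i : Int) ≤ (PySem.List.sorted p.2 (fun x => x) false).getD 1 0) ∧
            p.2.length = 2) ∧ p.1 = (j : Int)) ↔
        ((colPosL grid j).length = 2 ∧
          (colPosL grid j).getD 0 0 ≤ (i : Int) ∧ (i : Int) ≤ (colPosL grid j).getD 1 0) := by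
      constructor
      · rintro ⟨p, hp, ⟨⟨hb1, hb2⟩, hl2⟩, hpj⟩
        have hval : p.2 = colPosL grid j := by
          have h := PySem.Dict.getD_of_mem_items _ hp (byColD_nodup grid _) []
          rw [hpj, byColD_getD grid _ j hjm] at h
          exact h.symm
        rw [hval, hsortC] at hb1 hb2
        rw [hval] at hl2
        exact ⟨hl2, hb1, hb2⟩
      · rintro ⟨hl2, hb1, hb2⟩
        have hCne : (byColD grid (grid.headD []).length).getD (j : Int) [] = colPosL grid j :=
          byColD_getD grid _ j hjm
        have hg : (byColD grid (grid.headD []).length).get? (j : Int) =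
            some (colPosL grid j) := by
          have hD := PySem.Dict.getD_eq_get?_getD (byColD grid (grid.headD []).length)
            (j : Int) ([] : List Int)
          cases hgq : (byColD grid (grid.headD []).length).get? (j : Int) with
          | none =>
            exfalso
            rw [hgq] at hD
            simp only [Option.getD_none] at hD
            rw [hCne] at hD
            rw [hD] at hl2
            simp at hl2
          | some v =>
            rw [hgq] at hD
            simp only [Option.getD_some] at hD
            rw [hCne] at hD
            rw [hD]
        refine ⟨((j : Int), colPosL grid j),
          PySem.Dict.mem_items_of_get?_eq_some _ hg, ⟨⟨?_, ?_⟩, hl2⟩, rfl⟩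
        · rw [hsortC]; exact hb1
        · rw [hsortC]; exact hb2
    simp only [Bool.or_eq_true, decide_eq_true_eq]
    by_cases hROW : (rowPosL (grid.headD []).length (grid.getD i [])).length = 2 ∧
        (rowPosL (grid.headD []).length (grid.getD i [])).getD 0 0 ≤ (j : Int) ∧
        (j : Int) ≤ (rowPosL (grid.headD []).length (grid.getD i [])).getD 1 0 <;>
      by_cases hCOL : (colPosL grid j).length = 2 ∧
        (colPosL grid j).getD 0 0 ≤ (i : Int) ∧ (i : Int) ≤ (colPosL grid j).getD 1 0
    · rw [if_pos ⟨hex_iff.2 hCOL, hjLi⟩, if_pos ⟨Or.inl hROW, hjm, hjLi⟩]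
    · rw [if_neg (fun h => hCOL (hex_iff.1 h.1)),
        if_pos ⟨hROW.1, hROW.2.1, hROW.2.2, hjLi⟩, if_pos ⟨Or.inl hROW, hjm, hjLi⟩]
    · rw [if_pos ⟨hex_iff.2 hCOL, hjLi⟩, if_pos ⟨Or.inr hCOL, hjm, hjLi⟩]
    · rw [if_neg (fun h => hCOL (hex_iff.1 h.1)),
        if_neg (fun h => hROW ⟨h.1, h.2.1, h.2.2.1⟩),
        if_neg (fun h => h.1.elim (fun hr => hROW hr) (fun hc => hCOL hc))]
  · -- surplus cell of a longer row: neither program touches it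
    have hmj : (grid.headD []).length ≤ j := Nat.le_of_not_lt hjm
    have hnoex : ¬ ((∃ p ∈ (byColD grid (grid.headD []).length).items,
          (((PySem.List.sorted p.2 (fun x => x) false).getD 0 0 ≤ (i : Int) ∧
            (i : Int) ≤ (PySem.List.sorted p.2 (fun x => x) false).getD 1 0) ∧
            p.2.length = 2) ∧ p.1 = (j : Int)) ∧
          (j : Int) < ((grid.getD i []).length : Int)) := by
      rintro ⟨⟨p, hp, -, hpj⟩, -⟩
      have hlt := byColD_items_lt grid _ p hp
      rw [hpj] at hlt
      omega
    rw [if_neg hnoex]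
    have hnorow : ¬ ((rowPosL (grid.headD []).length (grid.getD i [])).length = 2 ∧
        (rowPosL (grid.headD []).length (grid.getD i [])).getD 0 0 ≤ (j : Int) ∧
        (j : Int) ≤ (rowPosL (grid.headD []).length (grid.getD i [])).getD 1 0 ∧
        (j : Int) < ((grid.getD i []).length : Int)) := by
      rintro ⟨h2, -, hb2, -⟩
      rcases List.length_eq_two.1 h2 with ⟨a, b, hab⟩
      have hbm : b < (((grid.headD []).length : Nat) : Int) :=
        rowPosL_lt (by rw [hab]; simp)
      rw [hab] at hb2
      simp only [List.getD_cons_succ, List.getD_cons_zero] at hb2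
      omega
    rw [if_neg hnorow, if_neg (fun h => hjm h.2.1)]

-- ===== VERDICT (by name: the statement is the Claim_ definition above) =====
theorem solve_ded97339_spec : Claim_equal_solve_ded97339 := by
  intro grid _ hpre
  exact solve_eq_cells grid hpre.2
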